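-- pv_equiv track=rewrite | github.com/pjark2/advent-of-code-2024 | day1/historian_hysteria.py | count_occurences
-- ===== SOURCE A (Python) =====
-- def count_occurences(left, right):
--     counted_occurences = list()
--     for number in left:
--         occurences = 0
--         for other_number in right:
--             if number == other_number:
--                 occurences += 1
--         counted_occurences.append(occurences)
--     return counted_occurences
-- ===== SOURCE B (Python) =====
-- from collections import Counter
--
-- def count_occurences(left, right):
--     counts = Counter(right)
--     return [counts[number] for number in left]
-- ===== Notes on version B (the rewrite author's own statement) =====
-- stated objective: faster
-- what changed: Replaces the nested scan of right for every left element with a Counter built once over right and a single O(1)-lookup pass over left.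
import Mathlib
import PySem

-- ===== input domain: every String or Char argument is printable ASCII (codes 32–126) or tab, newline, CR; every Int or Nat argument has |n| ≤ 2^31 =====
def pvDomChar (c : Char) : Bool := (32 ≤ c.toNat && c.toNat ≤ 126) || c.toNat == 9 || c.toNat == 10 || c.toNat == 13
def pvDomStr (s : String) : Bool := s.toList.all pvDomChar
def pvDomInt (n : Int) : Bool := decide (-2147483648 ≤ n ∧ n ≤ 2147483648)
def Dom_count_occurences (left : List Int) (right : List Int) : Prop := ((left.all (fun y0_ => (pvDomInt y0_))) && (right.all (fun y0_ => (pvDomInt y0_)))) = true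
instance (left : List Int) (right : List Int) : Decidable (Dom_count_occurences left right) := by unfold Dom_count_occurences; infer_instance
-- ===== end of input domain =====

-- B replaces A's nested rescan of `right` with a Counter built once over `right` plus one lookup per element of `left` (faster).


-- ===== PORT A =====
-- A: for each number in left, scan right counting equal elements.
def count_occurences (left : List Int) (right : List Int) : List Int :=
  left.foldl (fun acc number =>
    acc ++ [right.foldl (fun occ other => if number == other then occ + 1 else occ) 0]) []

-- ===== PORT B =====
-- B (faster): build a Counter over right once, then one lookup per left element.
def count_occurences_alt (left : List Int) (right : List Int) : List Int :=
  let counts := PySem.Dict.counter right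
  left.map (fun number => counts.getD number 0)

-- ===== PRECONDITION & SPEC =====
def Spec_count_occurences (left : List Int) (right : List Int) (out : List Int) : Prop := out = count_occurences_alt left right
instance (left : List Int) (right : List Int) (out : List Int) : Decidable (Spec_count_occurences left right out) := by unfold Spec_count_occurences; infer_instance

-- ===== CLAIM (what is proved, stated in full; the proofs are below) =====
def Claim_equal_count_occurences : Prop := ∀ (left : List Int) (right : List Int), Dom_count_occurences left right → Spec_count_occurences left right (count_occurences left right)

-- ===== LEMMAS AND PROOFS =====

-- ===== VERDICT (by name: the statement is the Claim_ definition above) =====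
-- A's inner scan counts equal elements of right.
theorem inner_fold_count (n : Int) (right : List Int) (acc : Int) :
    right.foldl (fun occ other => if n == other then occ + 1 else occ) acc
      = acc + right.count n := by
  induction right generalizing acc with
  | nil => simp [List.count_nil]
  | cons x xs ih =>
      rw [List.foldl_cons, ih]
      rw [List.count_cons]
      by_cases h : n = x <;> simp [h] <;> omega

theorem outer_foldl_eq_map (left right : List Int) (acc : List Int) :
    left.foldl (fun acc number =>
      acc ++ [right.foldl (fun occ other => if number == other then occ + 1 else occ) 0]) acc
      = acc ++ left.map (fun number => (right.count number : Int)) := by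
  induction left generalizing acc with
  | nil => simp
  | cons x xs ih =>
      rw [List.foldl_cons, ih, inner_fold_count]
      simp

theorem count_occurences_spec : Claim_equal_count_occurences := by
  intro left right _
  unfold Spec_count_occurences count_occurences count_occurences_alt
  simp only [outer_foldl_eq_map, List.nil_append]
  exact List.map_congr_left fun n _ => (PySem.Dict.getD_counter ..).symm
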